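-- pv_equiv track=rewrite | github.com/kulnel2026/Music-Recommender-System | Music.py | userMostLikes
-- ===== SOURCE A (Python) =====
-- def userMostLikes(userMap):
--   ''' This is a function written by MW, the function takes the userMap that is most up to date and returns either the name of the user with the most liked artists, or no user found if there is no users with any likes.'''
--   #working
--   max = -1
--   most = None
--   for user in userMap:
--     if user[-1] != '$':
--       if len(userMap[user]) > max:
--         most = user
--         max = len(userMap[user])
--   if most == None:
--     return "Sorry, no user found."
--   return most
-- ===== SOURCE B (Python) =====
-- def userMostLikes(userMap):
--     candidates = [user for user in userMap if not user.endswith('$')]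
--     if not candidates:
--         return "Sorry, no user found."
--     return sorted(candidates, key=lambda user: len(userMap[user]), reverse=True)[0]
-- ===== Notes on version B (the rewrite author's own statement) =====
-- stated objective: alternative
-- what changed: Replaces the running-maximum scan with an Option/sentinel state by filter-then-stable-descending-sort and taking the front element (stability preserves A's first-winner tie-break).
import Mathlib
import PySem

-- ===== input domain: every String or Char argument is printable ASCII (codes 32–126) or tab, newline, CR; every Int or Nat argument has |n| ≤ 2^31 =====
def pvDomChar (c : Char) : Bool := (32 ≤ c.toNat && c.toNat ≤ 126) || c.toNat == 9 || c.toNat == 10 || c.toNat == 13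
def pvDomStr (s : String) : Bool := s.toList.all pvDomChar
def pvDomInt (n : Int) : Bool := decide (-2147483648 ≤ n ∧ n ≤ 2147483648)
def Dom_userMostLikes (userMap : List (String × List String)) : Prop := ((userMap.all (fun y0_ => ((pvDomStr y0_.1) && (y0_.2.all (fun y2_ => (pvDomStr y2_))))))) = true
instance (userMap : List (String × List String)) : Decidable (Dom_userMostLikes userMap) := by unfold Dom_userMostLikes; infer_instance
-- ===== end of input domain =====

-- B replaces A's running-maximum scan by filter + stable descending sort + take the front element
-- (objective: alternative; same return values, stability preserves A's first-winner tie-break).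

-- ===== PORT A =====
def userMostLikes (userMap : List (String × List String)) : String :=
  let d := PySem.Dict.mk userMap
  let r := userMap.foldl (fun (s : Int × Option String) kv =>
      if PySem.Str.pyGet? kv.1 (-1) ≠ some '$' then
        if ((d.getD kv.1 []).length : Int) > s.1 then
          (((d.getD kv.1 []).length : Int), some kv.1)
        else s
      else s) (-1, none)
  match r.2 with
  | none => "Sorry, no user found."
  | some u => u

-- ===== PORT B =====
def userMostLikes_alt (userMap : List (String × List String)) : String :=
  let d := PySem.Dict.mk userMap
  let candidates := (userMap.map Prod.fst).filter (fun u => !(PySem.Str.endswith u "$"))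
  if candidates.isEmpty then "Sorry, no user found."
  else PySem.List.pyGetD
    (PySem.List.sorted candidates (fun u => ((d.getD u []).length : Int)) true) 0 ""

-- ===== PRECONDITION & SPEC =====
-- Pre_ excludes maps with an empty-string key: there Python A raises IndexError at user[-1].
def Pre_userMostLikes (userMap : List (String × List String)) : Prop :=
  ∀ kv ∈ userMap, kv.1 ≠ ""
instance (userMap : List (String × List String)) : Decidable (Pre_userMostLikes userMap) := by
  unfold Pre_userMostLikes; infer_instance
def pvWitness_userMostLikes : (List (String × List String)) := [("a", ["x"]), ("b$", ["y", "z"])]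


def Spec_userMostLikes (userMap : List (String × List String)) (out : String) : Prop := out = userMostLikes_alt userMap
instance (userMap : List (String × List String)) (out : String) : Decidable (Spec_userMostLikes userMap out) := by unfold Spec_userMostLikes; infer_instance

-- ===== CLAIM (what is proved, stated in full; the proofs are below) =====
def Claim_equal_userMostLikes : Prop := ∀ (userMap : List (String × List String)), Dom_userMostLikes userMap → Pre_userMostLikes userMap → Spec_userMostLikes userMap (userMostLikes userMap)

-- ===== LEMMAS AND PROOFS =====

-- For a nonempty string, "last char is not '$'" (A's test) and "does not end with '$'" (B's test) agree.
theorem condEq (s : String) (h : s ≠ "") :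
    (!(PySem.Str.endswith s "$")) = (PySem.Str.pyGet? s (-1) ≠ some '$' : Bool) := by
  have hl : s.toList ≠ [] := by
    intro hn; apply h; cases s; simp_all
  simp only [PySem.Str.endswith_eq, PySem.Str.pyGet?_eq, PySem.Chars.pyGet?,
    PySem.List.pyGet?_neg_one]
  rcases List.eq_nil_or_concat s.toList with h2 | ⟨l2, c, h2⟩
  · exact absurd h2 hl
  · rw [h2]
    have he : PySem.Chars.endswith (l2.concat c) ("$".toList) = decide (c = '$') := by
      by_cases hc : c = '$'
      · subst hc
        simp only [decide_true, List.concat_eq_append]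
        rw [PySem.Chars.endswith_iff]
        exact List.suffix_append l2 _
      · simp only [hc, decide_false]
        rw [Bool.eq_false_iff, Ne, PySem.Chars.endswith_iff]
        intro hsuf
        obtain ⟨t, ht⟩ := hsuf
        have := congrArg List.getLast? ht
        simp [List.concat_eq_append, List.getLast?_append] at this
        exact hc this.symm
    rw [he]
    simp [List.concat_eq_append, List.getLast?_append]

-- Head of the stable descending insertion sort's fold = result of the running-maximum fold.
theorem headFold {α : Type} (key : α → Int) :
    ∀ (l : List α) (a : α) (t : List α),
    (l.foldl (fun acc x => PySem.List.insertBy (fun p q => decide (key q < key p)) x acc) (a :: t)).head?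
      = some ((l.foldl (fun (s : Int × α) x => if key x > s.1 then (key x, x) else s) (key a, a)).2) := by
  intro l
  induction l with
  | nil => intro a t; simp
  | cons x l ih =>
    intro a t
    simp only [List.foldl_cons, PySem.List.insertBy]
    by_cases h : key a < key x
    · simp [h, ih x (a :: t), gt_iff_lt]
    · simp [h, ih a (PySem.List.insertBy _ x t), gt_iff_lt]

-- The Option-carrying running maximum, once seeded with a value, tracks the plain one.
theorem optFold {α : Type} (key : α → Int) :
    ∀ (l : List α) (m : Int) (a : α),
    (l.foldl (fun (s : Int × Option α) x => if key x > s.1 then (key x, some x) else s) (m, some a))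
      = ((l.foldl (fun (s : Int × α) x => if key x > s.1 then (key x, x) else s) (m, a)).1,
         some (l.foldl (fun (s : Int × α) x => if key x > s.1 then (key x, x) else s) (m, a)).2) := by
  intro l
  induction l with
  | nil => intro m a; rfl
  | cons x l ih =>
    intro m a
    simp only [List.foldl_cons]
    by_cases h : key x > m <;> simp [h, ih]

-- ===== VERDICT (by name: the statement is the Claim_ definition above) =====
theorem userMostLikes_spec : Claim_equal_userMostLikes := by
  intro um _ hpre
  unfold Spec_userMostLikes userMostLikes userMostLikes_alt
  simp only []
  set d := PySem.Dict.mk um with hd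
  set key : String → Int := fun u => ((d.getD u []).length : Int) with hkey
  -- A's loop over the pairs is a loop over the keys
  have h1 : um.foldl (fun (s : Int × Option String) kv =>
      if PySem.Str.pyGet? kv.1 (-1) ≠ some '$' then
        if key kv.1 > s.1 then (key kv.1, some kv.1) else s
      else s) (-1, none)
      = (um.map Prod.fst).foldl (fun (s : Int × Option String) u =>
          if PySem.Str.pyGet? u (-1) ≠ some '$' then
            if key u > s.1 then (key u, some u) else s
          else s) (-1, none) := by rw [List.foldl_map]
  -- skip-branch loop over the keys = plain loop over the filtered keys
  have h2 : (um.map Prod.fst).foldl (fun (s : Int × Option String) u =>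
          if PySem.Str.pyGet? u (-1) ≠ some '$' then
            if key u > s.1 then (key u, some u) else s
          else s) (-1, none)
      = ((um.map Prod.fst).filter (fun u => !(PySem.Str.endswith u "$"))).foldl
          (fun (s : Int × Option String) u =>
            if key u > s.1 then (key u, some u) else s) (-1, none) := by
    rw [List.foldl_filter]
    apply PySem.List.foldl_congr_mem
    intro acc x hx
    have hne : x ≠ "" := by
      obtain ⟨kv, hkv, rfl⟩ := List.mem_map.mp hx
      exact hpre kv hkv
    rw [condEq x hne]
    simp
  rw [h1, h2]
  cases hc : (um.map Prod.fst).filter (fun u => !(PySem.Str.endswith u "$")) with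
  | nil => simp
  | cons c cs =>
    have hkc : key c > -1 := by
      have : (0 : Int) ≤ key c := Int.natCast_nonneg _
      omega
    -- A's side: seed the running maximum with the first candidate
    simp only [List.foldl_cons, if_pos hkc, optFold key]
    -- B's side: sort = insertion fold seeded with the first candidate
    rw [PySem.List.sorted_rev_eq_foldl_insertBy]
    simp only [List.foldl_cons, PySem.List.insertBy, List.isEmpty_cons, Bool.false_eq_true,
      if_false]
    have hh := headFold key cs c []
    cases hs : cs.foldl (fun acc x =>
        PySem.List.insertBy (fun p q => decide (key q < key p)) x acc) [c] with
    | nil => rw [hs] at hh; simp at hh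
    | cons b bs =>
      rw [hs] at hh
      simp only [List.head?_cons, Option.some_inj] at hh
      rw [PySem.List.pyGetD_zero]
      simp [hh]
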